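-- pv_equiv track=rewrite | github.com/aadakouda/competitiveProgramming | AtCoder/競プロ典型90問/067.py | to_9
-- ===== SOURCE A (Python) =====
-- def to_9(n):
--     result = ''
--     n = to_10(n)
--     while n >= 9:
--         result = str(n%9) + result
--         n //= 9
--     result = str(n) + result
--     return result
--
-- def to_10(n):
--     n = str(n)[::-1]
--     return sum([int(n[i]) * (8**i) for i in range(len(n))])
-- ===== SOURCE B (Python) =====
-- def to_9(n):
--     # Horner pass: read str(n)'s digits left-to-right as base-8.
--     v = 0
--     for c in str(n):
--         v = v * 8 + int(c)
--     # base-9 digits collected little-endian, joined reversed.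
--     digits = []
--     while True:
--         digits.append(str(v % 9))
--         v //= 9
--         if v == 0:
--             break
--     return ''.join(reversed(digits))
-- ===== Notes on version B (the rewrite author's own statement) =====
-- stated objective: alternative
-- what changed: to_10's reverse-and-power-sum (sum of int(digit)*8**i over the reversed string) is replaced by a single left-to-right Horner pass (acc = acc*8 + int(c)), and the base-9 conversion builds a list of digit strings little-endian and joins the reversed list instead of repeated string-prefix concatenation.
import Mathlib
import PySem

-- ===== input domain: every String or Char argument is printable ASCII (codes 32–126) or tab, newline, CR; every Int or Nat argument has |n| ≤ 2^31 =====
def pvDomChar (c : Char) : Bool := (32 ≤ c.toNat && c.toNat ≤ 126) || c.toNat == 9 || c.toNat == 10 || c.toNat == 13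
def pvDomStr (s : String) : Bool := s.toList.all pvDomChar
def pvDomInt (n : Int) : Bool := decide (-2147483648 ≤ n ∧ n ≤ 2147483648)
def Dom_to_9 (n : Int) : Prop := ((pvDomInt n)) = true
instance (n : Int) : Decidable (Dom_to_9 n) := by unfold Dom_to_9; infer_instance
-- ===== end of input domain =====

-- B replaces A's reverse-and-power-sum base-8 read with a single Horner pass and builds the
-- base-9 string by joining a reversed digit list instead of repeated prefix concatenation
-- (alternative decomposition, same exact result; Python A and B both raise ValueError on n < 0,
-- which Pre_to_9 excludes).


-- ===== PORT A =====
-- int(s) on a one-character string, as both Pythons apply it to each digit character;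
-- Pre_to_9 (0 ≤ n) guarantees every character is a decimal digit, so Python never raises
-- there and the `.getD 0` default is never the value used.
def pvDigit (c : Char) : Int := (PySem.Int.ofChars? [c]).getD 0

-- to_10: n = str(n)[::-1]; sum([int(n[i]) * (8**i) for i in range(len(n))])
def pvTo10 (n : Int) : Int :=
  ((PySem.List.pyRange 0 (PySem.List.len (PySem.Int.toChars n).reverse)).map
      (fun i => pvDigit (PySem.List.pyGetD (PySem.Int.toChars n).reverse i ' ') * 8 ^ i.toNat)).sum

-- while n >= 9: result = str(n%9) + result; n //= 9
def pvLoopA (n : Int) (result : List Char) : List Char :=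
  if _h : 9 ≤ n then
    pvLoopA (PySem.Int.floordiv n 9) (PySem.Int.toChars (PySem.Int.mod n 9) ++ result)
  else
    PySem.Int.toChars n ++ result
termination_by n.toNat
decreasing_by
  rw [PySem.Int.floordiv_eq_ediv_of_pos (by norm_num : (0:Int) < 9)]
  omega

def to_9 (n : Int) : String := String.mk (pvLoopA (pvTo10 n) [])

-- ===== PORT B =====
-- v = 0; for c in str(n): v = v*8 + int(c)
def pvHorner (cs : List Char) : Int := cs.foldl (fun v c => v * 8 + pvDigit c) 0

-- digits = []; while True: digits.append(str(v%9)); v //= 9; if v == 0: break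
-- (the inner `natAbs` test is only a totality guard for Lean; on the values this is
-- applied to — pvHorner results, which are ≥ 0 — it always holds when v' ≠ 0)
def pvDigitsB (v : Int) : List (List Char) :=
  if PySem.Int.floordiv v 9 = 0 then [PySem.Int.toChars (PySem.Int.mod v 9)]
  else if _h : (PySem.Int.floordiv v 9).natAbs < v.natAbs then
    PySem.Int.toChars (PySem.Int.mod v 9) :: pvDigitsB (PySem.Int.floordiv v 9)
  else [PySem.Int.toChars (PySem.Int.mod v 9)]
termination_by v.natAbs

-- return ''.join(reversed(digits))
def to_9_alt (n : Int) : String :=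
  String.mk ((pvDigitsB (pvHorner (PySem.Int.toChars n))).reverse.flatten)

-- ===== PRECONDITION & SPEC =====
-- Pre_to_9 excludes exactly n < 0: there str(n) starts with '-' and int('-') raises
-- ValueError in A (and in B); A returns on every n ≥ 0.
def Pre_to_9 (n : Int) : Prop := 0 ≤ n
instance (n : Int) : Decidable (Pre_to_9 n) := by unfold Pre_to_9; infer_instance

def pvWitness_to_9 : Int := 64

def Spec_to_9 (n : Int) (out : String) : Prop := out = to_9_alt n
instance (n : Int) (out : String) : Decidable (Spec_to_9 n out) := by unfold Spec_to_9; infer_instance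

-- ===== CLAIM (what is proved, stated in full; the proofs are below) =====
def Claim_equal_to_9 : Prop := ∀ (n : Int), Dom_to_9 n → Pre_to_9 n → Spec_to_9 n (to_9 n)

-- ===== LEMMAS AND PROOFS =====

-- every single-character int() value is a Nat cast (or the default 0), hence nonnegative
lemma pvOptNonneg (p : Option Nat) :
    0 ≤ ((Option.map (fun n : Int => n) (do let a ← p; pure ((a : Int)))).getD 0) := by
  cases p <;> simp

lemma pvDigit_nonneg (c : Char) : 0 ≤ pvDigit c := by
  by_cases h1 : c = '-'
  · subst h1; decide
  simp only [pvDigit, PySem.Int.ofChars?]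
  split
  · next ds heq =>
      exfalso
      have hsub := (List.dropWhile_sublist (p := PySem.Int.isIntSpace)
        (l := (List.dropWhile PySem.Int.isIntSpace [c]).reverse)).subset
      have hm : '-' ∈ (List.dropWhile PySem.Int.isIntSpace
          (List.dropWhile PySem.Int.isIntSpace [c]).reverse).reverse := by rw [heq]; simp
      simp only [List.mem_reverse] at hm
      have hm2 := hsub hm
      simp only [List.mem_reverse] at hm2
      have hm3 := (List.dropWhile_sublist (p := PySem.Int.isIntSpace) (l := [c])).subset hm2
      simp at hm3
      exact h1 hm3.symm
  · exact pvOptNonneg _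
  · exact pvOptNonneg _

lemma pvHorner_nonneg (cs : List Char) : 0 ≤ pvHorner cs := by
  induction cs using List.reverseRecOn with
  | nil => simp [pvHorner]
  | append_singleton t c ih =>
      simp only [pvHorner, List.foldl_append, List.foldl_cons, List.foldl_nil] at *
      have := pvDigit_nonneg c
      nlinarith

lemma pvSum_range (xs : List Char) :
    ((List.range xs.length).map (fun k => pvDigit (xs.getD k ' ') * 8 ^ k)).sum
      = xs.reverse.foldl (fun v c => v * 8 + pvDigit c) 0 := by
  induction xs with
  | nil => simp
  | cons c t ih =>
      rw [List.length_cons, List.range_succ_eq_map]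
      simp only [List.map_cons, List.getD_cons_zero, List.map_map, List.sum_cons,
        List.reverse_cons]
      have hmap : (List.map ((fun k => pvDigit ((c :: t).getD k ' ') * 8 ^ k) ∘ (· + 1))
          (List.range t.length))
          = List.map (fun k => 8 * (pvDigit (t.getD k ' ') * 8 ^ k)) (List.range t.length) := by
        apply List.map_congr_left
        intro k _
        simp only [Function.comp_apply, List.getD_cons_succ]
        ring
      rw [hmap, List.foldl_append, List.foldl_cons, List.foldl_nil]
      rw [List.sum_map_mul_left, ih]
      ring

lemma pvTo10_eq (n : Int) : pvTo10 n = pvHorner (PySem.Int.toChars n) := by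
  unfold pvTo10 pvHorner
  have hlen : PySem.List.len (PySem.Int.toChars n).reverse
      = ((PySem.Int.toChars n).reverse.length : Int) := by
    simp [PySem.List.len]
  rw [hlen, PySem.List.pyRange_zero_natCast, List.map_map]
  have hmap : (List.map ((fun i => pvDigit (PySem.List.pyGetD (PySem.Int.toChars n).reverse i ' ')
        * 8 ^ i.toNat) ∘ (fun k : Nat => (k : Int)))
        (List.range (PySem.Int.toChars n).reverse.length))
      = List.map (fun k => pvDigit ((PySem.Int.toChars n).reverse.getD k ' ') * 8 ^ k)
        (List.range (PySem.Int.toChars n).reverse.length) := by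
    apply List.map_congr_left
    intro k _
    simp [PySem.List.pyGetD_natCast]
  rw [hmap, pvSum_range, List.reverse_reverse]

lemma pvLoop_eq_digits : ∀ (fuel : Nat) (v : Int), v.toNat ≤ fuel → 0 ≤ v →
    ∀ res, pvLoopA v res = (pvDigitsB v).reverse.flatten ++ res := by
  intro fuel
  induction fuel with
  | zero =>
      intro v hf hv res
      have hv0 : v = 0 := by omega
      subst hv0
      rw [pvLoopA, pvDigitsB]
      norm_num [PySem.Int.floordiv, PySem.Int.mod]
  | succ k ih =>
      intro v hf hv res
      have h9 : (0:Int) < 9 := by norm_num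
      rw [pvLoopA, pvDigitsB]
      simp only [PySem.Int.floordiv_eq_ediv_of_pos h9, PySem.Int.mod_eq_emod_of_pos h9]
      by_cases hge : 9 ≤ v
      · have hpos : 1 ≤ v / 9 := by omega
        have hne : ¬ (v / 9 = 0) := by omega
        have habs : (v / 9).natAbs < v.natAbs := by
          have : v / 9 < v := by omega
          omega
        simp only [dif_pos hge, if_neg hne, dif_pos habs, List.reverse_cons,
          List.flatten_append, List.flatten_cons, List.flatten_nil, List.append_nil]
        rw [ih (v / 9) (by omega) (by omega)]
        · simp [List.append_assoc]
      · have hz : v / 9 = 0 := by omega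
        have hmod : v % 9 = v := by omega
        simp [dif_neg hge, hz, hmod]

-- ===== VERDICT (by name: the statement is the Claim_ definition above) =====
theorem to_9_spec : Claim_equal_to_9 := by
  intro n _ hpre
  unfold Spec_to_9 to_9 to_9_alt
  rw [pvTo10_eq]
  have hnn := pvHorner_nonneg (PySem.Int.toChars n)
  rw [pvLoop_eq_digits (pvHorner (PySem.Int.toChars n)).toNat _ le_rfl hnn]
  simp
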